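-- pv_equiv track=rewrite | github.com/spikehockey75/FromSoftSeamlessCoOpManager | app/core/mod_installer.py | _detect_root_folder
-- ===== SOURCE A (Python) =====
-- def _detect_root_folder(file_list: list[str]) -> str | None:
--     """If all files share a common root folder, return it."""
--     if not file_list:
--         return None
--     # Normalize separators to forward slash
--     normalized = [f.replace("\\", "/") for f in file_list]
--     first_part = normalized[0].split("/")[0]
--     if all(f.startswith(first_part + "/") or f == first_part for f in normalized):
--         return first_part
--     return None
-- ===== SOURCE B (Python) =====
-- def _detect_root_folder(file_list: list[str]) -> str | None:
--     """If all files share a common root folder, return it."""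
--     def root(f):
--         f = f.replace("\\", "/")
--         i = f.find("/")
--         return f if i == -1 else f[:i]
--     roots = {root(f) for f in file_list}
--     return roots.pop() if len(roots) == 1 else None
-- ===== Notes on version B (the rewrite author's own statement) =====
-- stated objective: idiomatic
-- what changed: Instead of fixing the first file's first segment as a reference and scanning all files with a startswith/equality test, B collects the distinct root segment of every file into a set and answers by the set's cardinality (1 -> that root, else None); the empty-list case falls out of the cardinality test.
import Mathlib
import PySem

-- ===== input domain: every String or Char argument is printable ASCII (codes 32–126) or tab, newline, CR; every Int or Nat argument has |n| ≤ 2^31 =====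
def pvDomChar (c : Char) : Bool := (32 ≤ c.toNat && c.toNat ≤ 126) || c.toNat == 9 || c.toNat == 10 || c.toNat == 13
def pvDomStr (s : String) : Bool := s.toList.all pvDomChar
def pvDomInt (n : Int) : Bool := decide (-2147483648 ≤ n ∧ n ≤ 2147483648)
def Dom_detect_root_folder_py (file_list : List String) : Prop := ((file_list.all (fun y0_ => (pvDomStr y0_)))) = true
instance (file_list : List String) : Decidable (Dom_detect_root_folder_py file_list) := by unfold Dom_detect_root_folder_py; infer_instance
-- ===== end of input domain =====

-- B replaces A's first-file-as-reference startswith scan by collecting the distinct root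
-- segment of every file into a set and deciding by its cardinality (idiomatic, same cost).


-- ===== PORT A =====
def detect_root_folder_py (file_list : List String) : Option String :=
  match file_list with
  | [] => none
  | _ :: _ =>
    -- normalized = [f.replace("\\", "/") for f in file_list]
    let normalized := file_list.map (fun f => PySem.Chars.replace f.toList ['\\'] ['/'])
    -- first_part = normalized[0].split("/")[0]
    let first_part := (PySem.Chars.splitOn (normalized.headD []) ['/']).headD []
    -- all(f.startswith(first_part + "/") or f == first_part for f in normalized)
    if normalized.all (fun f => PySem.Chars.startswith f (first_part ++ ['/']) || f == first_part)
    then some (String.mk first_part)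
    else none

-- ===== PORT B =====
-- root(f): normalize, then the prefix up to the first "/" (whole string if none)
def pvRootSeg (f : String) : List Char :=
  let g := PySem.Chars.replace f.toList ['\\'] ['/']
  let i := PySem.Chars.find g ['/']
  if i = -1 then g else PySem.Chars.slice g none (some i)

def detect_root_folder_py_alt (file_list : List String) : Option String :=
  let roots := PySem.Set.ofList (file_list.map pvRootSeg)
  match roots with
  | [x] => some (String.mk x)   -- roots.pop() when len(roots) == 1
  | _ => none

-- ===== PRECONDITION & SPEC =====
def Spec_detect_root_folder_py (file_list : List String) (out : Option String) : Prop := out = detect_root_folder_py_alt file_list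
instance (file_list : List String) (out : Option String) : Decidable (Spec_detect_root_folder_py file_list out) := by unfold Spec_detect_root_folder_py; infer_instance

-- ===== CLAIM (what is proved, stated in full; the proofs are below) =====
def Claim_equal_detect_root_folder_py : Prop := ∀ (file_list : List String), Dom_detect_root_folder_py file_list → Spec_detect_root_folder_py file_list (detect_root_folder_py file_list)

-- ===== LEMMAS AND PROOFS =====

-- splitOn.go accumulates into acc reversed, then reverses: peel the accumulator off.
theorem splitOn_go_acc (sep : List Char) (fuel : Nat) (l cur : List Char)
    (acc : List (List Char)) :
    PySem.Chars.splitOn.go sep fuel l cur acc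
      = acc.reverse ++ PySem.Chars.splitOn.go sep fuel l cur [] := by
  induction fuel generalizing l cur acc with
  | zero => simp [PySem.Chars.splitOn.go]
  | succ fuel ih =>
    cases l with
    | nil => simp [PySem.Chars.splitOn.go]
    | cons c rest =>
      simp only [PySem.Chars.splitOn.go]
      split_ifs with h
      · rw [ih _ _ (cur.reverse :: acc), ih _ _ ([cur.reverse])]
        simp
      · rw [ih rest (c :: cur) acc]

-- head of splitOn.go on separator "/" is the accumulated prefix up to the first '/'
theorem splitOn_go_head (fuel : Nat) (l cur : List Char) (hf : l.length ≤ fuel) :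
    (PySem.Chars.splitOn.go ['/'] fuel l cur []).headD []
      = cur.reverse ++ l.takeWhile (· != '/') := by
  induction fuel generalizing l cur with
  | zero =>
    have : l = [] := List.eq_nil_of_length_eq_zero (Nat.le_zero.mp hf)
    subst this
    simp [PySem.Chars.splitOn.go]
  | succ fuel ih =>
    cases l with
    | nil => simp [PySem.Chars.splitOn.go]
    | cons c rest =>
      simp only [PySem.Chars.splitOn.go]
      split_ifs with h
      · have hc : c = '/' := by
          simp [List.isPrefixOf] at h
          exact h.symm
        rw [splitOn_go_acc]
        subst hc
        simp [List.takeWhile_cons]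
      · have hc : c ≠ '/' := by
          intro hc; subst hc
          simp [List.isPrefixOf] at h
        rw [ih rest (c :: cur) (by simpa using Nat.le_of_succ_le_succ hf)]
        simp [List.takeWhile_cons, hc]

theorem splitOn_head (g : List Char) :
    (PySem.Chars.splitOn g ['/']).headD [] = g.takeWhile (· != '/') := by
  unfold PySem.Chars.splitOn
  simpa using splitOn_go_head (g.length + 1) g [] (by omega)

-- take up to the first failing position is takeWhile
theorem takeWhile_eq_take (g : List Char) (k : Nat) (hk : k < g.length)
    (hbefore : ∀ i (h : i < k), g[i]'(by omega) ≠ '/') (hat : g[k] = '/') :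
    g.takeWhile (· != '/') = g.take k := by
  induction g generalizing k with
  | nil => simp at hk
  | cons c rest ih =>
    cases k with
    | zero =>
      have hc : c = '/' := by simpa using hat
      simp [List.takeWhile_cons, hc]
    | succ k =>
      have hc : c ≠ '/' := by
        have := hbefore 0 (Nat.succ_pos k)
        simpa using this
      rw [List.takeWhile_cons]
      have hcb : (c != '/') = true := by simp [hc]
      rw [if_pos hcb, List.take_succ_cons]
      rw [ih k (by simpa using Nat.lt_of_succ_lt_succ hk)
          (fun i h => by simpa using hbefore (i+1) (by omega))
          (by simpa using hat)]

-- B's root(f) is the takeWhile up to the first '/'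
theorem pvRootSeg_eq (f : String) :
    pvRootSeg f = (PySem.Chars.replace f.toList ['\\'] ['/']).takeWhile (· != '/') := by
  unfold pvRootSeg
  set g := PySem.Chars.replace f.toList ['\\'] ['/'] with hg
  by_cases h : PySem.Chars.find g ['/'] = -1
  · rw [if_pos h]
    have hin : ¬ ['/'] <:+: g := (PySem.Chars.find_eq_neg_one_iff g ['/']).mp h
    have : ∀ x ∈ g, (x != '/') = true := by
      intro x hx
      simp only [bne_iff_ne, ne_eq]
      intro hxe; subst hxe
      apply hin
      rcases List.mem_iff_append.mp hx with ⟨l1, l2, hsp⟩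
      exact ⟨l1, l2, by rw [hsp]; simp⟩
    exact (List.takeWhile_eq_self_iff.mpr this).symm
  · rw [if_neg h]
    have hge : 0 ≤ PySem.Chars.find g ['/'] := by
      have := PySem.Chars.neg_one_le_find g ['/']
      omega
    obtain ⟨hpre, hmin⟩ := PySem.Chars.find_spec (s := g) (sub := ['/']) hge
    set n := (PySem.Chars.find g ['/']).toNat with hn
    have hlt : n < g.length := by
      have h1 := PySem.Chars.find_le_length g ['/']
      rcases List.IsPrefix.length_le hpre with hlen
      simp only [List.length_cons, List.length_nil, List.length_drop] at hlen
      omega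
    rw [PySem.Chars.slice_eq_listSlice, PySem.List.slice_to g hge]
    rw [takeWhile_eq_take g n hlt ?_ ?_]
    · intro i hi
      have := hmin i hi
      intro he
      apply this
      rw [List.drop_eq_getElem_cons (by omega)]
      simp [he]
    · have hdrop := hpre
      rw [List.drop_eq_getElem_cons hlt] at hdrop
      obtain ⟨t, ht⟩ := hdrop
      have := congrArg (fun l => l.headD ' ') ht
      simp only [List.cons_append, List.nil_append, List.headD_cons] at this
      exact this.symm

-- takeWhile through a clean prefix followed by '/'
theorem takeWhile_append_slash (p t : List Char) (hp : '/' ∉ p) :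
    (p ++ '/' :: t).takeWhile (· != '/') = p := by
  induction p with
  | nil => simp [List.takeWhile_cons]
  | cons c cs ih =>
    have hc : c ≠ '/' := by intro h; exact hp (h ▸ List.mem_cons_self)
    rw [List.cons_append, List.takeWhile_cons]
    simp [hc, ih (fun h => hp (List.mem_cons_of_mem _ h))]

-- A's per-file test is exactly "same root segment"
theorem pred_iff_root (p f : List Char) (hp : '/' ∉ p) :
    (PySem.Chars.startswith f (p ++ ['/']) || f == p) = true
      ↔ f.takeWhile (· != '/') = p := by
  constructor
  · intro h
    rcases Bool.or_eq_true_iff.mp h with h | h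
    · obtain ⟨t, ht⟩ := (PySem.Chars.startswith_iff f (p ++ ['/'])).mp h
      rw [← ht]
      simpa using takeWhile_append_slash p t hp
    · have : f = p := by simpa using h
      subst this
      exact List.takeWhile_eq_self_iff.mpr (by
        intro x hx
        simp only [bne_iff_ne, ne_eq]
        intro he; exact hp (he ▸ hx))
  · intro h
    cases hdw : f.dropWhile (· != '/') with
    | nil =>
      have : f = p := by
        conv_lhs => rw [← List.takeWhile_append_dropWhile (p := (· != '/')) (l := f)]
        rw [h, hdw, List.append_nil]
      simp [this]
    | cons c t =>
      have hne : f.dropWhile (· != '/') ≠ [] := by simp [hdw]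
      have hhead := List.head_dropWhile_not (p := (· != '/')) hne
      have hc : c = '/' := by
        simp only [hdw, List.head_cons] at hhead
        simpa using hhead
      apply Bool.or_eq_true_iff.mpr
      left
      apply (PySem.Chars.startswith_iff f (p ++ ['/'])).mpr
      refine ⟨t, ?_⟩
      conv_rhs => rw [← List.takeWhile_append_dropWhile (p := (· != '/')) (l := f)]
      rw [h, hdw, hc]
      simp

-- a foldl of Set.add only extends the state
theorem prefix_foldl_add {α : Type} [BEq α] (l : List α) (s : PySem.Set α) :
    s <+: l.foldl PySem.Set.add s := by
  induction l generalizing s with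
  | nil => simp
  | cons x xs ih =>
    refine List.IsPrefix.trans ?_ (ih (PySem.Set.add s x))
    unfold PySem.Set.add
    split_ifs <;> simp

theorem foldl_add_singleton {α : Type} [BEq α] [LawfulBEq α] (l : List α) (x : α) :
    l.foldl PySem.Set.add [x] = [x] ↔ ∀ y ∈ l, y = x := by
  induction l with
  | nil => simp
  | cons y ys ih =>
    by_cases hy : y = x
    · subst hy
      simp only [List.foldl_cons]
      have : PySem.Set.add [y] y = [y] := by
        simp [PySem.Set.add, PySem.Set.contains]
      rw [this]
      simp only [List.mem_cons]
      constructor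
      · intro h z hz
        rcases hz with hz | hz
        · exact hz
        · exact (ih.mp h) z hz
      · intro h
        exact ih.mpr (fun z hz => h z (Or.inr hz))
    · constructor
      · intro h
        exfalso
        simp only [List.foldl_cons] at h
        have hadd : PySem.Set.add [x] y = [x, y] := by
          simp [PySem.Set.add, PySem.Set.contains, hy]
        rw [hadd] at h
        have := (prefix_foldl_add ys [x, y]).length_le
        rw [h] at this
        simp at this
      · intro h
        exact absurd (h y (List.mem_cons_self)) hy

theorem foldl_add_two {α : Type} [BEq α] [LawfulBEq α] (l : List α) (x : α)
    (hex : ∃ y ∈ l, y ≠ x) : 2 ≤ (l.foldl PySem.Set.add [x]).length := by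
  induction l with
  | nil => simp at hex
  | cons y ys ih =>
    by_cases hy : y = x
    · subst hy
      simp only [List.foldl_cons]
      have : PySem.Set.add [y] y = [y] := by
        simp [PySem.Set.add, PySem.Set.contains]
      rw [this]
      apply ih
      rcases hex with ⟨z, hz, hzx⟩
      rcases List.mem_cons.mp hz with h | h
      · exact absurd h hzx
      · exact ⟨z, h, hzx⟩
    · simp only [List.foldl_cons]
      have hadd : PySem.Set.add [x] y = [x, y] := by
        simp [PySem.Set.add, PySem.Set.contains, hy]
      rw [hadd]
      have := (prefix_foldl_add ys [x, y]).length_le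
      simpa using this

-- ===== VERDICT (by name: the statement is the Claim_ definition above) =====
theorem detect_root_folder_py_spec : Claim_equal_detect_root_folder_py := by
  intro file_list _
  unfold Spec_detect_root_folder_py detect_root_folder_py detect_root_folder_py_alt
  cases file_list with
  | nil => simp [PySem.Set.ofList, PySem.Set.empty]
  | cons f0 fs =>
    simp only
    set p := ((PySem.Chars.splitOn
        (((f0 :: fs).map (fun f => PySem.Chars.replace f.toList ['\\'] ['/'])).headD [])
        ['/']).headD []) with hpdef
    have hp : p = (PySem.Chars.replace f0.toList ['\\'] ['/']).takeWhile (· != '/') := by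
      rw [hpdef]
      simp only [List.map_cons, List.headD_cons]
      exact splitOn_head _
    have hpmem : '/' ∉ p := by
      rw [hp]
      intro hmem
      have := List.mem_takeWhile_imp hmem
      simp at this
    have hroot : ∀ f, pvRootSeg f = (PySem.Chars.replace f.toList ['\\'] ['/']).takeWhile (· != '/') :=
      pvRootSeg_eq
    have hroot0 : pvRootSeg f0 = p := by rw [hroot f0, hp]
    have hfold : PySem.Set.ofList ((f0 :: fs).map pvRootSeg)
        = (fs.map pvRootSeg).foldl PySem.Set.add [p] := by
      simp [PySem.Set.ofList, PySem.Set.empty, PySem.Set.add, PySem.Set.contains, hroot0]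
    by_cases hall : ((f0 :: fs).map (fun f => PySem.Chars.replace f.toList ['\\'] ['/'])).all
        (fun f => PySem.Chars.startswith f (p ++ ['/']) || f == p) = true
    · rw [if_pos hall]
      have hallroot : ∀ f ∈ fs, pvRootSeg f = p := by
        intro f hf
        rw [hroot f]
        apply (pred_iff_root p _ hpmem).mp
        exact List.all_eq_true.mp hall _ (List.mem_map_of_mem (List.mem_cons_of_mem _ hf))
      have : PySem.Set.ofList ((f0 :: fs).map pvRootSeg) = [p] := by
        rw [hfold]
        apply (foldl_add_singleton _ _).mpr
        intro y hy
        rcases List.mem_map.mp hy with ⟨f, hf, rfl⟩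
        exact hallroot f hf
      rw [this]
    · rw [if_neg hall]
      have hex : ∃ y ∈ fs.map pvRootSeg, y ≠ p := by
        have h : ∃ g ∈ (f0 :: fs).map (fun f => PySem.Chars.replace f.toList ['\\'] ['/']),
            ¬ ((PySem.Chars.startswith g (p ++ ['/']) || g == p) = true) := by
          by_contra hno
          push_neg at hno
          exact hall (List.all_eq_true.mpr hno)
        rcases h with ⟨g, hg, hgp⟩
        rcases List.mem_map.mp hg with ⟨f, hf, rfl⟩
        rcases List.mem_cons.mp hf with rfl | hf'
        · exfalso
          apply hgp
          apply (pred_iff_root p _ hpmem).mpr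
          rw [← hp]
        · refine ⟨pvRootSeg f, List.mem_map_of_mem hf', ?_⟩
          rw [hroot f]
          intro he
          exact hgp ((pred_iff_root p _ hpmem).mpr he)
      have hlen := foldl_add_two (fs.map pvRootSeg) p hex
      rw [hfold]
      rcases hlist : (fs.map pvRootSeg).foldl PySem.Set.add [p] with _ | ⟨a, _ | ⟨b, rest⟩⟩
      · rfl
      · exfalso; rw [hlist] at hlen; simp at hlen
      · rfl
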